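-- pv_equiv track=rewrite | github.com/Achille981/Collatz | rearangement.py | suivantImpaire
-- ===== SOURCE A (Python) =====
-- def suivantImpaire (n : int):
--     "Cette fonction calcule le nombre impaire qui suit 'n' d'après la suite de Collatz"
--     if (isinstance(n, int)) and (n>0) :
--         if (n % 2 == 1):
--             m = 3*n + 1
--             while (m % 2 == 0) :
--                 m //= 2
--         else :
--             while (n % 2 == 0) :
--                 n //= 2
--             m = n
--     else :
--         m = "ERREUR"
--     return m
-- ===== SOURCE B (Python) =====
-- def suivantImpaire(n: int):
--     "Cette fonction calcule le nombre impaire qui suit 'n' d'apres la suite de Collatz"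
--     if isinstance(n, int) and n > 0:
--         x = 3 * n + 1 if n % 2 == 1 else n
--         return x // (x & -x)
--     return "ERREUR"
-- ===== Notes on version B (the rewrite author's own statement) =====
-- stated objective: idiomatic
-- what changed: replaces the while-loop that repeatedly halves away the even part with the closed-form odd-part extraction x // (x & -x) via the lowest-set-bit trick, after unifying the odd/even branches into one base value
-- outside the precondition, e.g. on suivantImpaire(0): A returns 'ERREUR', B returns 'ERREUR'; on suivantImpaire(-4): A returns 'ERREUR', B returns 'ERREUR'
import Mathlib
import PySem

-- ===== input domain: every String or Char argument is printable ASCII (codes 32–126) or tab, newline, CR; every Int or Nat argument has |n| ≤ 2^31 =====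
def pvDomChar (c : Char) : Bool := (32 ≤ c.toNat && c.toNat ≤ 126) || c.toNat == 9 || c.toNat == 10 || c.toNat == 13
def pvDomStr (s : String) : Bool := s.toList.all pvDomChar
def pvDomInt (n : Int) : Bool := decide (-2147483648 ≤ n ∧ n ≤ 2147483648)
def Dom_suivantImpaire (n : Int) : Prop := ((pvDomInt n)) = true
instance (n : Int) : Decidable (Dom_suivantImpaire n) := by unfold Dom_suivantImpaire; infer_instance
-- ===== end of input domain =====

-- B replaces A's while-loop stripping factors of 2 by the closed-form odd-part
-- extraction x // (x & -x) (lowest-set-bit trick); equivalence is about the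
-- return value on positive n (elsewhere Python A returns the string "ERREUR").

-- ===== PORT A =====
-- 'while (m % 2 == 0): m //= 2'; the '0 < m' guard only makes the loop total
-- (the Python loop is entered with a positive value only; on m ≤ 0 it would not terminate)
def pvDivOut (m : Int) : Int :=
  if _h : PySem.Int.mod m 2 = 0 ∧ 0 < m then pvDivOut (PySem.Int.floordiv m 2) else m
termination_by m.toNat
decreasing_by
  obtain ⟨-, h2⟩ := _h
  rw [PySem.Int.floordiv_eq_ediv_of_pos (by omega : (0:Int) < 2)]
  omega

def suivantImpaire (n : Int) : Int :=
  if 0 < n then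
    if PySem.Int.mod n 2 = 1 then pvDivOut (3 * n + 1)
    else pvDivOut n
  else 0   -- Python returns the string "ERREUR" here; excluded by Pre_suivantImpaire

-- ===== PORT B =====
def suivantImpaire_alt (n : Int) : Int :=
  if 0 < n then
    let x : Int := if PySem.Int.mod n 2 = 1 then 3 * n + 1 else n
    PySem.Int.floordiv x (Int.land x (-x))   -- Python's 'x & -x' is two's-complement Int.land (exact)
  else 0   -- Python returns the string "ERREUR" here; excluded by Pre_suivantImpaire

-- ===== PRECONDITION & SPEC =====
-- Pre_ excludes n ≤ 0, where Python A returns the string "ERREUR", not an int.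
def Pre_suivantImpaire (n : Int) : Prop := 0 < n
instance (n : Int) : Decidable (Pre_suivantImpaire n) := by unfold Pre_suivantImpaire; infer_instance
def pvWitness_suivantImpaire : Int := (3)
def Spec_suivantImpaire (n : Int) (out : Int) : Prop := out = suivantImpaire_alt n
instance (n : Int) (out : Int) : Decidable (Spec_suivantImpaire n out) := by unfold Spec_suivantImpaire; infer_instance

-- ===== CLAIM (what is proved, stated in full; the proofs are below) =====
def Claim_equal_suivantImpaire : Prop := ∀ (n : Int), Dom_suivantImpaire n → Pre_suivantImpaire n → Spec_suivantImpaire n (suivantImpaire n)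

-- ===== LEMMAS AND PROOFS =====

-- Nat-level facts about the lowest-set-bit pattern ldiff a (a-1) = a &&& ~(a-1)
theorem pv_ldiff_odd (a : Nat) (h : a % 2 = 1) : Nat.ldiff a (a - 1) = 1 := by
  apply Nat.eq_of_testBit_eq
  intro i
  rw [Nat.testBit_ldiff]
  cases i with
  | zero =>
      simp only [Nat.testBit_zero]
      have h1 : (a - 1) % 2 = 0 := by omega
      simp [h, h1]
  | succ i =>
      rw [Nat.testBit_succ, Nat.testBit_succ]
      have hq : a / 2 = (a - 1) / 2 := by omega
      rw [hq]
      simp [Nat.testBit_succ]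

theorem pv_ldiff_even (b : Nat) (hb : 0 < b) :
    Nat.ldiff (2 * b) (2 * b - 1) = 2 * Nat.ldiff b (b - 1) := by
  apply Nat.eq_of_testBit_eq
  intro i
  cases i with
  | zero =>
      rw [Nat.testBit_ldiff]
      simp only [Nat.testBit_zero]
      have h1 : 2 * b % 2 = 0 := by omega
      have h2 : 2 * Nat.ldiff b (b - 1) % 2 = 0 := by omega
      simp [h1, h2]
  | succ i =>
      rw [Nat.testBit_ldiff, Nat.testBit_succ, Nat.testBit_succ, Nat.testBit_succ]
      have h1 : 2 * b / 2 = b := by omega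
      have h2 : (2 * b - 1) / 2 = b - 1 := by omega
      have h3 : 2 * Nat.ldiff b (b - 1) / 2 = Nat.ldiff b (b - 1) := by omega
      rw [h1, h2, h3, Nat.testBit_ldiff]

-- (a : Int).land (-(a : Int)) computed through Nat.ldiff for positive a
theorem pv_land_pos (a : Nat) (ha : 0 < a) :
    Int.land (a : Int) (-(a : Int)) = ((Nat.ldiff a (a - 1) : Nat) : Int) := by
  obtain ⟨k, rfl⟩ : ∃ k, a = k + 1 := ⟨a - 1, by omega⟩
  rfl

theorem pv_land_odd (x : Int) (hx : 0 < x) (hodd : x % 2 = 1) : Int.land x (-x) = 1 := by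
  obtain ⟨a, rfl⟩ := Int.eq_ofNat_of_zero_le hx.le
  have ha : 0 < a := by exact_mod_cast hx
  have hodd' : a % 2 = 1 := by omega
  rw [pv_land_pos a ha, pv_ldiff_odd a hodd']
  simp

theorem pv_land_double (y : Int) (hy : 0 < y) :
    Int.land (2 * y) (-(2 * y)) = 2 * Int.land y (-y) := by
  obtain ⟨b, rfl⟩ := Int.eq_ofNat_of_zero_le hy.le
  have hb : 0 < b := by exact_mod_cast hy
  have h2b : (2 * (b : Int)) = ((2 * b : Nat) : Int) := by push_cast; ring
  rw [h2b, pv_land_pos (2 * b) (by omega), pv_land_pos b hb, pv_ldiff_even b hb]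
  push_cast; ring

-- x & -x is positive for positive x
theorem pv_land_pos_pos_aux (N : Nat) : ∀ (y : Int), y.toNat ≤ N → 0 < y → 0 < Int.land y (-y) := by
  induction N with
  | zero => intro y h hy; omega
  | succ N ih =>
      intro y h hy
      by_cases he : y % 2 = 0
      · obtain ⟨z, rfl⟩ : ∃ z, y = 2 * z := ⟨y / 2, by omega⟩
        rw [pv_land_double z (by omega)]
        have := ih z (by omega) (by omega)
        omega
      · rw [pv_land_odd y hy (by omega)]; omega

theorem pv_land_pos_pos (y : Int) (hy : 0 < y) : 0 < Int.land y (-y) :=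
  pv_land_pos_pos_aux y.toNat y le_rfl hy

-- the while-loop of A equals the closed form of B on every positive input
theorem pv_divOut_eq_aux (N : Nat) : ∀ (x : Int), x.toNat ≤ N → 0 < x →
    pvDivOut x = PySem.Int.floordiv x (Int.land x (-x)) := by
  induction N with
  | zero => intro x h hx; omega
  | succ N ih =>
      intro x h hx
      rw [pvDivOut]
      have hmod : PySem.Int.mod x 2 = x % 2 := PySem.Int.mod_eq_emod_of_pos (by omega)
      by_cases he : x % 2 = 0
      · rw [dif_pos ⟨by rw [hmod]; exact he, hx⟩]
        obtain ⟨y, rfl⟩ : ∃ y, x = 2 * y := ⟨x / 2, by omega⟩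
        have hy : 0 < y := by omega
        have hfd : PySem.Int.floordiv (2 * y) 2 = y := by
          rw [PySem.Int.floordiv_eq_ediv_of_pos (by omega : (0:Int) < 2)]; omega
        rw [hfd, ih y (by omega) hy, pv_land_double y hy]
        have hc : 0 < Int.land y (-y) := pv_land_pos_pos y hy
        rw [PySem.Int.floordiv_eq_ediv_of_pos hc,
            PySem.Int.floordiv_eq_ediv_of_pos (by omega : 0 < 2 * Int.land y (-y)),
            Int.mul_ediv_mul_of_pos _ _ (by omega : (0:Int) < 2)]
      · rw [dif_neg (by rw [hmod]; exact fun hc => he hc.1)]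
        rw [pv_land_odd x hx (by omega),
            PySem.Int.floordiv_eq_ediv_of_pos (by omega : (0:Int) < 1), Int.ediv_one]

theorem pv_divOut_eq (x : Int) (hx : 0 < x) :
    pvDivOut x = PySem.Int.floordiv x (Int.land x (-x)) :=
  pv_divOut_eq_aux x.toNat x le_rfl hx

-- ===== VERDICT (by name: the statement is the Claim_ definition above) =====
theorem suivantImpaire_spec : Claim_equal_suivantImpaire := by
  intro n _hdom hpre
  unfold Spec_suivantImpaire suivantImpaire suivantImpaire_alt
  have hpre' : 0 < n := hpre
  rw [if_pos hpre', if_pos hpre']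
  by_cases hodd : PySem.Int.mod n 2 = 1
  · rw [if_pos hodd, if_pos hodd]
    exact pv_divOut_eq (3 * n + 1) (by omega)
  · rw [if_neg hodd, if_neg hodd]
    exact pv_divOut_eq n hpre'
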